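-- pv_equiv track=rewrite | github.com/linux-warrior/algorithms | sprint8/main/g.py | search_with_shift
-- ===== SOURCE A (Python) =====
-- from collections.abc import Iterable, Sequence
--
-- def search_with_shift(values: Sequence[int], pattern: Sequence[int]) -> Iterable[int]:
--     values_len = len(values)
--     pattern_len = len(pattern)
--
--     for i in range(values_len - pattern_len + 1):
--         found = True
--         shift = values[i] - pattern[0]
--
--         for j in range(1, pattern_len):
--             if values[i + j] != pattern[j] + shift:
--                 found = False
--                 break
--
--         if found:
--             yield i
-- ===== SOURCE B (Python) =====
-- def _diffs(xs):
--     return [xs[j + 1] - xs[j] for j in range(len(xs) - 1)]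
--
--
-- def search_with_shift(values, pattern):
--     # Shift-invariant matching via consecutive-difference arrays:
--     # a window matches up to an additive shift iff its difference
--     # slice equals the pattern's difference array.
--     pd = _diffs(pattern)
--     vd = _diffs(values)
--     w = len(pd)
--     return (i for i in range(len(values) - len(pattern) + 1)
--             if vd[i:i + w] == pd)
-- ===== Notes on version B (the rewrite author's own statement) =====
-- stated objective: alternative
-- what changed: B precomputes the consecutive-difference arrays of values and pattern once and tests each window by a single slice comparison, replacing A's per-window shift computation and element-by-element inner loop with break.
-- outside the precondition, e.g. on search_with_shift([5, 7], []): A raises IndexError, B returns [0, 1, 2]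
import Mathlib
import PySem

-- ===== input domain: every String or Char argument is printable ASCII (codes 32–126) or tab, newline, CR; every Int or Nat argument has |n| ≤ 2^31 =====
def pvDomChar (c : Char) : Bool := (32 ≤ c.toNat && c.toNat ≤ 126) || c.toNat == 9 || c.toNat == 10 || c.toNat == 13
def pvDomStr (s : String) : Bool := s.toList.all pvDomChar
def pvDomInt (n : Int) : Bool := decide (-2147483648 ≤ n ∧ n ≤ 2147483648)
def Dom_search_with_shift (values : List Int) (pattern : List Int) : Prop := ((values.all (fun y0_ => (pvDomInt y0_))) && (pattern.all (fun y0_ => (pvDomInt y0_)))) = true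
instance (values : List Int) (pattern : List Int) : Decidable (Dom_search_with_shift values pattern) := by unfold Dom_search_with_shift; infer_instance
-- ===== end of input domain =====

-- B replaces A's shift-and-compare inner loop by matching precomputed
-- consecutive-difference arrays with slice comparison (objective: alternative).

-- ===== PORT A =====
-- inner 'for j in range(1, m)' loop with its break, carrying the found flag
def pvInnerA (values pattern : List Int) (i shift : Int) : List Int → Bool
  | [] => true
  | j :: js =>
    if PySem.List.pyGetD values (i + j) 0 ≠ PySem.List.pyGetD pattern j 0 + shift then false
    else pvInnerA values pattern i shift js

def search_with_shift (values : List Int) (pattern : List Int) : List Int :=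
  let n : Int := values.length
  let m : Int := pattern.length
  (PySem.List.pyRange 0 (n - m + 1) 1).foldl (fun acc i =>
    let shift := PySem.List.pyGetD values i 0 - PySem.List.pyGetD pattern 0 0
    if pvInnerA values pattern i shift (PySem.List.pyRange 1 m 1) then acc ++ [i] else acc) []

-- ===== PORT B =====
-- port of Source B's _diffs: [xs[j+1] - xs[j] for j in range(len(xs) - 1)]
def pvDiffs (xs : List Int) : List Int :=
  (PySem.List.pyRange 0 ((xs.length : Int) - 1) 1).map
    (fun j => PySem.List.pyGetD xs (j + 1) 0 - PySem.List.pyGetD xs j 0)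

def search_with_shift_alt (values : List Int) (pattern : List Int) : List Int :=
  let pd := pvDiffs pattern
  let vd := pvDiffs values
  let w : Int := pd.length
  (PySem.List.pyRange 0 ((values.length : Int) - (pattern.length : Int) + 1) 1).foldl
    (fun acc i =>
      if PySem.List.slice vd (some i) (some (i + w)) = pd then acc ++ [i] else acc) []

-- ===== PRECONDITION & SPEC =====
-- Pre_ excludes exactly the inputs with empty pattern, on which A raises IndexError.
def Pre_search_with_shift (values : List Int) (pattern : List Int) : Prop := pattern ≠ []
instance (values : List Int) (pattern : List Int) : Decidable (Pre_search_with_shift values pattern) := by unfold Pre_search_with_shift; infer_instance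
def pvWitness_search_with_shift : List Int × List Int := ([1, 3, 2, 4, 3], [2, 4, 3])

def Spec_search_with_shift (values : List Int) (pattern : List Int) (out : List Int) : Prop := out = search_with_shift_alt values pattern
instance (values : List Int) (pattern : List Int) (out : List Int) : Decidable (Spec_search_with_shift values pattern out) := by unfold Spec_search_with_shift; infer_instance

-- ===== CLAIM (what is proved, stated in full; the proofs are below) =====
def Claim_equal_search_with_shift : Prop := ∀ (values : List Int) (pattern : List Int), Dom_search_with_shift values pattern → Pre_search_with_shift values pattern → Spec_search_with_shift values pattern (search_with_shift values pattern)

-- ===== LEMMAS AND PROOFS =====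

-- A's inner break-loop as an 'all' over the remaining js
theorem pvInnerA_eq_all (values pattern : List Int) (i shift : Int) (js : List Int) :
    pvInnerA values pattern i shift js
      = js.all (fun j => PySem.List.pyGetD values (i + j) 0 == PySem.List.pyGetD pattern j 0 + shift) := by
  induction js with
  | nil => rfl
  | cons j js ih =>
    by_cases h : PySem.List.pyGetD values (i + j) 0 = PySem.List.pyGetD pattern j 0 + shift
    · simp [pvInnerA, h, ih]
    · simp [pvInnerA, h]

theorem pvDiffs_eq (xs : List Int) :
    pvDiffs xs = (List.range (xs.length - 1)).map
      (fun k : Nat => PySem.List.pyGetD xs ((k : Int) + 1) 0 - PySem.List.pyGetD xs (k : Int) 0) := by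
  unfold pvDiffs
  rw [PySem.List.pyRange_one]
  rw [List.map_map]
  have : ((xs.length : Int) - 1 - 0).toNat = xs.length - 1 := by omega
  rw [this]
  apply List.map_congr_left
  intro k _
  simp

theorem pvDiffs_length (xs : List Int) : (pvDiffs xs).length = xs.length - 1 := by
  rw [pvDiffs_eq]; simp

-- telescoping: equal consecutive differences give equal shifted values
theorem pv_tele (V P : Int → Int) (a : Nat) (M : Nat)
    (h : ∀ k : Nat, k + 1 < M → V ((a : Int) + (k + 1 : Nat)) - V ((a : Int) + (k : Nat)) = P ((k + 1 : Nat)) - P (k : Nat)) :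
    ∀ j : Nat, j < M → V ((a : Int) + (j : Nat)) = P (j : Nat) + (V (a : Int) - P 0) := by
  intro j
  induction j with
  | zero => intro _; norm_num
  | succ j ih =>
    intro hj
    have h1 := h j hj
    have h2 := ih (by omega)
    push_cast at h1 h2 ⊢
    linarith

-- window of a mapped range equals a mapped range iff pointwise equal
theorem pv_win {α : Type} (f g : Nat → α) (n m a : Nat) (h : a + m ≤ n) :
    (((List.range n).map f).drop a).take m = (List.range m).map g ↔ ∀ k, k < m → f (a + k) = g k := by
  constructor
  · intro he k hk
    have h2 := congrArg (fun l => l[k]?) he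
    simp only [List.getElem?_take, List.getElem?_drop, List.getElem?_map] at h2
    simp [hk, show a + k < n by omega] at h2
    exact h2
  · intro he
    apply List.ext_getElem?
    intro nn
    by_cases hnn : nn < m
    · simp only [List.getElem?_take, List.getElem?_drop, List.getElem?_map]
      simp [hnn, show a + nn < n by omega, he nn hnn]
    · simp only [List.getElem?_take, List.getElem?_drop, List.getElem?_map]
      simp [hnn]

-- the per-position equivalence of the two tests
theorem pv_key (values pattern : List Int) (a : Nat)
    (hM : 1 ≤ pattern.length) (ha : a + pattern.length ≤ values.length) :
    (pvInnerA values pattern (a : Int)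
        (PySem.List.pyGetD values (a : Int) 0 - PySem.List.pyGetD pattern 0 0)
        (PySem.List.pyRange 1 (pattern.length : Int) 1) = true)
      ↔ PySem.List.slice (pvDiffs values) (some (a : Int))
          (some ((a : Int) + ((pvDiffs pattern).length : Int))) = pvDiffs pattern := by
  rw [PySem.List.slice_natCast_add, pvDiffs_length, pvDiffs_eq values, pvDiffs_eq pattern,
    pv_win _ _ _ _ _ (by omega), pvInnerA_eq_all, List.all_eq_true]
  constructor
  · intro h k hk
    have hall : ∀ jn : Nat, jn < pattern.length →
        PySem.List.pyGetD values ((a : Int) + jn) 0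
          = PySem.List.pyGetD pattern (jn : Int) 0
            + (PySem.List.pyGetD values (a : Int) 0 - PySem.List.pyGetD pattern 0 0) := by
      intro jn hj
      rcases Nat.eq_zero_or_pos jn with h0 | h0
      · subst h0; norm_num
      · have hm : (jn : Int) ∈ PySem.List.pyRange 1 (pattern.length : Int) 1 := by
          rw [PySem.List.mem_pyRange_one]
          exact ⟨by exact_mod_cast h0, by exact_mod_cast hj⟩
        simpa using h (jn : Int) hm
    have h1 := hall (k + 1) (by omega)
    have h2 := hall k (by omega)
    push_cast at h1 h2 ⊢
    rw [show ((a : Int) + ((k : Int) + 1)) = (a : Int) + (k : Int) + 1 by ring] at h1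
    linarith
  · intro h j hj
    rw [PySem.List.mem_pyRange_one] at hj
    obtain ⟨jn, rfl⟩ : ∃ jn : Nat, j = (jn : Int) := ⟨j.toNat, by omega⟩
    have hjn : jn < pattern.length := by exact_mod_cast hj.2
    have htele := pv_tele (fun t => PySem.List.pyGetD values t 0)
      (fun t => PySem.List.pyGetD pattern t 0) a pattern.length
      (fun k hk => by
        have := h k (by omega)
        push_cast at this ⊢
        rw [show ((a : Int) + ((k : Int) + 1)) = (a : Int) + (k : Int) + 1 by ring]
        linarith) jn hjn
    simp only [beq_iff_eq]
    simpa using htele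

-- ===== VERDICT (by name: the statement is the Claim_ definition above) =====
theorem search_with_shift_spec : Claim_equal_search_with_shift := by
  intro values pattern _ hpre
  unfold Spec_search_with_shift search_with_shift search_with_shift_alt
  simp only []
  apply PySem.List.foldl_congr_mem
  intro acc i hi
  rw [PySem.List.mem_pyRange_one] at hi
  obtain ⟨h0, h1⟩ := hi
  have hM : 1 ≤ pattern.length := by
    cases pattern with
    | nil => exact absurd rfl hpre
    | cons x xs => simp
  obtain ⟨a, rfl⟩ : ∃ a : Nat, i = (a : Int) := ⟨i.toNat, (Int.toNat_of_nonneg h0).symm⟩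
  have ha : a + pattern.length ≤ values.length := by omega
  exact if_congr (pv_key values pattern a hM ha) rfl rfl
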